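-- pv_equiv track=rewrite | github.com/yamaji-hironori/AtCoder | ant_book/begginer/2-3-4/napzak.py | enum_full
-- ===== SOURCE A (Python) =====
-- def enum_full(start, end, ele, W, VW):
--     pattern = []
--     for i_bin in range(2**ele):
--         v, w = 0, 0
--         for j_N in range(start, end):
--             if i_bin & (1 << (j_N-start)) == 0:
--                 continue
--             v += VW[j_N][0]
--             w += VW[j_N][1]
--         if w <= W:
--             pattern.append([v, w])
--
--     pattern.sort()
--     pre_v ,pre_w = float('inf'), float('inf')
--     del_vw = []
--     for i_v, i_w in pattern[::-1]:
--         if i_v == pre_v and i_w < pre_w: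
--             del_vw.append([pre_v, pre_w])
--         elif i_v != pre_v and i_w >= pre_w:
--             del_vw.append([i_v, i_w])
--         else:
--             pre_v, pre_w = i_v, i_w
--     pattern = [vw for vw in pattern if not vw in del_vw]
--     wv = [[w,v] for v,w in pattern]
--     return wv
-- ===== SOURCE B (Python) =====
-- def enum_full(start, end, ele, W, VW):
--     # Subset sums of all 2**ele bitmasks by doubling: bit k of a mask selects
--     # item VW[start + k] when that index lies before end, and selects nothing
--     # otherwise; then drop dominated (value, weight) pairs using a set.
--     sums = [(0, 0)]
--     for k in range(ele):
--         j = start + k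
--         vk, wk = (VW[j][0], VW[j][1]) if j < end else (0, 0)
--         sums += [(v + vk, w + wk) for v, w in sums]
--     pattern = sorted(vw for vw in sums if vw[1] <= W)
--     dele = set()
--     pre = None
--     for v, w in reversed(pattern):
--         if pre is not None:
--             pv, pw = pre
--             if v == pv and w < pw:
--                 dele.add(pre)
--                 continue
--             if v != pv and w >= pw:
--                 dele.add((v, w))
--                 continue
--         pre = (v, w)
--     return [[w, v] for v, w in pattern if (v, w) not in dele]
-- ===== Notes on version B (the rewrite author's own statement) =====
-- stated objective: alternative
-- what changed: B builds the subset sums by a doubling DP over the ele bit positions (each step maps the item of one bit over the sums so far) instead of A's per-bitmask re-summation loop over range(2**ele), and collects the dominance filter's deletions in a set instead of a list.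
import Mathlib
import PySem

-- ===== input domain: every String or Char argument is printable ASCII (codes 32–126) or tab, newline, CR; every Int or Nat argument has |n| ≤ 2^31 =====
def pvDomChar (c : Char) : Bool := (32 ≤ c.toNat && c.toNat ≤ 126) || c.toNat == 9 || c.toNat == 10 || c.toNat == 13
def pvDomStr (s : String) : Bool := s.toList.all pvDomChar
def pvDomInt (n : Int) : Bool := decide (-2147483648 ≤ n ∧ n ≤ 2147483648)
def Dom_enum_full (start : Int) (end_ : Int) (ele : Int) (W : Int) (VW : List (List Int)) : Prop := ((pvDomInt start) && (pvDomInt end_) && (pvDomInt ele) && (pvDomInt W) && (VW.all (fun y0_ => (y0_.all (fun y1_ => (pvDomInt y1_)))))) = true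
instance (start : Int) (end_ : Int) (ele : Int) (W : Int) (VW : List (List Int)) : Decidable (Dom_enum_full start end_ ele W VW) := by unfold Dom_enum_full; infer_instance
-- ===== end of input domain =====

-- B computes the subset sums by a doubling DP over the ele bit positions instead of A's
-- per-bitmask re-summation loop, and collects the dominance filter's deletions in a set
-- instead of a list; same return value on every input of Pre_.

-- ===== PORT A =====
-- VW[j][0], VW[j][1]: none exactly where Python raises IndexError
def pvRowVW (VW : List (List Int)) (j : Int) : Option (Int × Int) :=
  match PySem.List.pyGet? VW j with
  | none => none
  | some row =>
    match PySem.List.pyGet? row 0, PySem.List.pyGet? row 1 with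
    | some a, some b => some (a, b)
    | _, _ => none

-- the inner 'for j_N in range(start, end)' loop of A, for one bitmask i
def pvASubset (start : Int) (end_ : Int) (VW : List (List Int)) (i : Nat) : Option (Int × Int) :=
  (PySem.List.pyRange start end_).foldl
    (fun acc j =>
      match acc with
      | none => none
      | some vw =>
        if i &&& (1 <<< (j - start).toNat) == 0 then some vw   -- 'continue'
        else match pvRowVW VW j with
             | none => none
             | some it => some (vw.1 + it.1, vw.2 + it.2))
    (some (0, 0))

-- the reversed-scan state step of A: pre (None plays float('inf')) and the del_vw LIST
def pvStepA (st : Option (Int × Int) × List (Int × Int)) (p : Int × Int) :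
    Option (Int × Int) × List (Int × Int) :=
  match st.1 with
  | none => (some p, st.2)           -- pre = inf: both tests are false, 'else' branch
  | some (pv, pw) =>
    if p.1 = pv ∧ p.2 < pw then (st.1, st.2 ++ [(pv, pw)])
    else if p.1 ≠ pv ∧ pw ≤ p.2 then (st.1, st.2 ++ [p])
    else (some p, st.2)

def enum_full (start : Int) (end_ : Int) (ele : Int) (W : Int) (VW : List (List Int)) : List (List Int) :=
  if ele < 0 then []   -- Python: range(2**ele) raises TypeError for ele < 0 (outside Pre_)
  else
    -- for i_bin in range(2**ele): … if w <= W: pattern.append([v, w])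
    -- ([v, w] 2-lists are represented as pairs; skipping 'none' = IndexError is outside Pre_)
    let pattern : List (Int × Int) :=
      (List.range (2 ^ ele.toNat)).foldl
        (fun pat i =>
          match pvASubset start end_ VW i with
          | none => pat
          | some vw => if vw.2 ≤ W then pat ++ [vw] else pat)
        []
    -- pattern.sort(): Python's lexicographic order on the 2-lists = tuple key (v, w)
    let pattern := PySem.List.sorted2 pattern (fun p => p.1) (fun p => p.2)
    -- the reversed scan over pattern[::-1] building del_vw
    let fin := pattern.reverse.foldl pvStepA (none, [])
    -- pattern = [vw for vw in pattern if not vw in del_vw]  (list membership)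
    ((pattern.filter (fun p => !(fin.2.contains p))).map (fun p => [p.2, p.1]))

-- ===== PORT B =====
-- '(VW[j][0], VW[j][1]) if j < end else (0, 0)'; the getD defaults are unreachable inside Pre_
def pvItemB (start : Int) (end_ : Int) (VW : List (List Int)) (k : Nat) : Int × Int :=
  let j := start + (k : Int)
  if j < end_ then
    let row := (PySem.List.pyGet? VW j).getD []
    (PySem.List.pyGetD row 0 0, PySem.List.pyGetD row 1 0)
  else (0, 0)

-- B's scan step: pre (None sentinel) and the del SET
def pvStepB (st : Option (Int × Int) × PySem.Set (Int × Int)) (p : Int × Int) :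
    Option (Int × Int) × PySem.Set (Int × Int) :=
  match st.1 with
  | none => (some p, st.2)
  | some (pv, pw) =>
    if p.1 = pv ∧ p.2 < pw then (st.1, PySem.Set.add st.2 (pv, pw))
    else if p.1 ≠ pv ∧ pw ≤ p.2 then (st.1, PySem.Set.add st.2 p)
    else (some p, st.2)

def enum_full_alt (start : Int) (end_ : Int) (ele : Int) (W : Int) (VW : List (List Int)) : List (List Int) :=
  -- for k in range(ele): sums += [(v + vk, w + wk) for v, w in sums]
  let sums := (List.range ele.toNat).foldl
      (fun sums k =>
        let it := pvItemB start end_ VW k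
        sums ++ sums.map (fun p => (p.1 + it.1, p.2 + it.2)))
      [(0, 0)]
  -- pattern = sorted(vw for vw in sums if vw[1] <= W)
  let pattern := PySem.List.sorted2 (sums.filter (fun p => p.2 ≤ W)) (fun p => p.1) (fun p => p.2)
  let fin := pattern.reverse.foldl pvStepB (none, PySem.Set.empty)
  ((pattern.filter (fun p => !(PySem.Set.contains fin.2 p))).map (fun p => [p.2, p.1]))

-- ===== PRECONDITION & SPEC =====
-- Pre_ = exactly the inputs where Python A returns: ele ≥ 0 (range(2**ele) else raises TypeError)
-- and each row VW[j] that A actually reads (j-start a set bit position < ele, start ≤ j < end)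
-- exists (Python negative-index wraparound included, via pyGet?) and has ≥ 2 entries.
def Pre_enum_full (start : Int) (end_ : Int) (ele : Int) (W : Int) (VW : List (List Int)) : Prop :=
  0 ≤ ele ∧ ∀ k ∈ List.range (min ele.toNat (end_ - start).toNat),
    2 ≤ ((PySem.List.pyGet? VW (start + (k : Int))).map List.length).getD 0
instance (start : Int) (end_ : Int) (ele : Int) (W : Int) (VW : List (List Int)) : Decidable (Pre_enum_full start end_ ele W VW) := by unfold Pre_enum_full; infer_instance

def pvWitness_enum_full : Int × Int × Int × Int × List (List Int) := (0, 2, 2, 10, [[3, 2], [4, 3]])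

def Spec_enum_full (start : Int) (end_ : Int) (ele : Int) (W : Int) (VW : List (List Int)) (out : List (List Int)) : Prop := out = enum_full_alt start end_ ele W VW
instance (start : Int) (end_ : Int) (ele : Int) (W : Int) (VW : List (List Int)) (out : List (List Int)) : Decidable (Spec_enum_full start end_ ele W VW out) := by unfold Spec_enum_full; infer_instance

-- ===== CLAIM (what is proved, stated in full; the proofs are below) =====
def Claim_equal_enum_full : Prop := ∀ (start : Int) (end_ : Int) (ele : Int) (W : Int) (VW : List (List Int)), Dom_enum_full start end_ ele W VW → Pre_enum_full start end_ ele W VW → Spec_enum_full start end_ ele W VW (enum_full start end_ ele W VW)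

-- ===== LEMMAS AND PROOFS =====

-- the subset sum for bitmask i over the ele bit positions (bit k selects pvItemB's item k)
def pvG (start : Int) (end_ : Int) (VW : List (List Int)) (m i : Nat) : Int × Int :=
  (List.range m).foldl
    (fun p k =>
      if i.testBit k then
        ((p.1 + (pvItemB start end_ VW k).1, p.2 + (pvItemB start end_ VW k).2))
      else p)
    (0, 0)

theorem pvPyRange_one_map (a b : Int) :
    PySem.List.pyRange a b = (List.range (b - a).toNat).map (fun k : Nat => a + (k : Int)) := by
  simp only [PySem.List.pyRange]
  norm_num
  split_ifs with h
  · induction (b - a).toNat with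
    | zero => rfl
    | succ n ih => simp [List.range_succ, ih]
  · have : (b - a).toNat = 0 := by omega
    simp [this]

theorem pvBitTest (i k : Nat) : (i &&& (1 <<< k) == 0) = !(i.testBit k) := by
  rw [Nat.one_shiftLeft, Nat.and_two_pow]
  cases h : i.testBit k <;> simp

theorem pvRow_eq_item (start : Int) (end_ : Int) (VW : List (List Int)) (k : Nat)
    (hlt : start + (k : Int) < end_)
    (h : 2 ≤ ((PySem.List.pyGet? VW (start + (k : Int))).map List.length).getD 0) :
    pvRowVW VW (start + (k : Int)) = some (pvItemB start end_ VW k) := by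
  unfold pvRowVW pvItemB
  cases hg : PySem.List.pyGet? VW (start + (k : Int)) with
  | none => simp [hg] at h
  | some row =>
    simp only [hg, Option.map_some, Option.getD_some] at h ⊢
    have h0 : PySem.List.pyGet? row 0 = some row[0] := by
      rw [PySem.List.pyGet?_of_nonneg row (by norm_num)]
      norm_num
    have h1 : PySem.List.pyGet? row 1 = some row[1] := by
      rw [PySem.List.pyGet?_of_nonneg row (by norm_num)]
      norm_num
    simp only [hlt, if_pos, PySem.List.pyGetD, h0, h1, Option.getD_some]

theorem pvG_succ (start : Int) (end_ : Int) (VW : List (List Int)) (m i : Nat) :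
    pvG start end_ VW (m + 1) i =
      (if i.testBit m then
        ((pvG start end_ VW m i).1 + (pvItemB start end_ VW m).1,
         (pvG start end_ VW m i).2 + (pvItemB start end_ VW m).2)
       else pvG start end_ VW m i) := by
  simp [pvG, List.range_succ]

-- steps whose bit is unset OR whose item is the zero item can be appended/dropped freely
theorem pvG_ext (start : Int) (end_ : Int) (VW : List (List Int)) (m m' i : Nat) (h : m' ≤ m)
    (hb : ∀ k, m' ≤ k → k < m → i.testBit k = false ∨ pvItemB start end_ VW k = (0, 0)) :
    pvG start end_ VW m i = pvG start end_ VW m' i := by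
  induction m with
  | zero => have : m' = 0 := by omega
            simp [this]
  | succ n ih =>
    by_cases hc : m' = n + 1
    · simp [hc]
    · have h1 : m' ≤ n := by omega
      have hrest := ih h1 (fun k hk1 hk2 => hb k hk1 (by omega))
      rw [pvG_succ]
      rcases hb n h1 (by omega) with hz | hz
      · rw [hz]; simpa using hrest
      · rw [hz]
        cases hbit : i.testBit n <;> simpa using hrest

theorem pvOptFold (start : Int) (end_ : Int) (VW : List (List Int)) (i : Nat) (ks : List Nat)
    (acc : Int × Int)
    (h : ∀ k ∈ ks, i.testBit k = true → pvRowVW VW (start + (k : Int)) = some (pvItemB start end_ VW k)) :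
    ks.foldl
        (fun a k =>
          match a with
          | none => none
          | some vw =>
            if i &&& (1 <<< k) == 0 then some vw
            else match pvRowVW VW (start + (k : Int)) with
                 | none => none
                 | some it => some (vw.1 + it.1, vw.2 + it.2))
        (some acc) =
      some (ks.foldl
        (fun p k =>
          if i.testBit k then
            ((p.1 + (pvItemB start end_ VW k).1, p.2 + (pvItemB start end_ VW k).2))
          else p)
        acc) := by
  induction ks generalizing acc with
  | nil => rfl
  | cons k ks ih =>
    rw [List.foldl_cons, List.foldl_cons]
    cases hb : i.testBit k with
    | false =>
      have hc : (i &&& (1 <<< k) == 0) = true := by rw [pvBitTest, hb]; rfl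
      simp only [hc, if_true, hb, Bool.false_eq_true, if_false]
      exact ih acc (fun k hk => h k (List.mem_cons_of_mem _ hk))
    | true =>
      have hc : (i &&& (1 <<< k) == 0) = false := by rw [pvBitTest, hb]; rfl
      simp only [hc, Bool.false_eq_true, if_false, hb, if_true]
      rw [h k (List.mem_cons_self) hb]
      exact ih _ (fun k hk => h k (List.mem_cons_of_mem _ hk))

theorem pvASubset_eq (start end_ : Int) (VW : List (List Int)) (ele : Int)
    (hele : 0 ≤ ele)
    (hrow : ∀ k ∈ List.range (min ele.toNat (end_ - start).toNat),
      2 ≤ ((PySem.List.pyGet? VW (start + (k : Int))).map List.length).getD 0)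
    (i : Nat) (hi : i < 2 ^ ele.toNat) :
    pvASubset start end_ VW i = some (pvG start end_ VW ele.toNat i) := by
  have hbits : ∀ k, i.testBit k = true → k < ele.toNat := by
    intro k hk
    by_contra hcon
    have : i < 2 ^ k := lt_of_lt_of_le hi (Nat.pow_le_pow_right (by omega) (by omega))
    rw [Nat.testBit_lt_two_pow this] at hk
    exact absurd hk (by simp)
  unfold pvASubset
  rw [pvPyRange_one_map, List.foldl_map]
  rw [PySem.List.foldl_congr_mem (List.range (end_ - start).toNat) _
      (fun (a : Option (Int × Int)) (k : Nat) =>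
        match a with
        | none => none
        | some vw =>
          if i &&& (1 <<< k) == 0 then some vw
          else match pvRowVW VW (start + (k : Int)) with
               | none => none
               | some it => some (vw.1 + it.1, vw.2 + it.2))
      (some (0, 0))
      (by
        intro a k _
        have h2 : (start + (k : Int) - start).toNat = k := by omega
        simp only [h2])]
  rw [pvOptFold start end_ VW i _ _ (by
    intro k hk hb
    rw [List.mem_range] at hk
    have hkel := hbits k hb
    exact pvRow_eq_item start end_ VW k (by omega)
      (hrow k (by rw [List.mem_range]; omega)))]
  congr 1
  show pvG start end_ VW (end_ - start).toNat i = pvG start end_ VW ele.toNat i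
  by_cases hc : ele.toNat ≤ (end_ - start).toNat
  · -- drop the bits in [ele, end-start): they are unset in i
    exact pvG_ext start end_ VW (end_ - start).toNat ele.toNat i hc
      (fun k hk1 hk2 => Or.inl (by
        cases hb : i.testBit k with
        | false => rfl
        | true => exact absurd (hbits k hb) (by omega)))
  · -- extend by the positions in [end-start, ele): their item is the zero item
    exact (pvG_ext start end_ VW ele.toNat (end_ - start).toNat i (by omega)
      (fun k hk1 hk2 => Or.inr (by
        unfold pvItemB
        rw [if_neg (by omega)]))).symm

theorem pvDouble_eq (start : Int) (end_ : Int) (VW : List (List Int)) (m : Nat) :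
    (List.range m).foldl
        (fun sums k =>
          sums ++ sums.map (fun p => (p.1 + (pvItemB start end_ VW k).1,
                                      p.2 + (pvItemB start end_ VW k).2)))
        [(0, 0)] =
      (List.range (2 ^ m)).map (fun i => pvG start end_ VW m i) := by
  induction m with
  | zero => simp [pvG]
  | succ n ih =>
    rw [List.range_succ, List.foldl_append, List.foldl_cons, List.foldl_nil, ih]
    have hsplit : List.range (2 ^ (n + 1)) =
        List.range (2 ^ n) ++ (List.range (2 ^ n)).map (fun x => 2 ^ n + x) := by
      rw [← List.range_add, pow_succ, mul_two]
    rw [hsplit, List.map_append, List.map_map]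
    congr 1
    · apply List.map_congr_left
      intro i hi
      rw [List.mem_range] at hi
      rw [pvG_succ, Nat.testBit_lt_two_pow hi]
      simp
    · rw [List.map_map]
      apply List.map_congr_left
      intro i hi
      rw [List.mem_range] at hi
      simp only [Function.comp_apply]
      rw [pvG_succ]
      have hbit : (2 ^ n + i).testBit n = true := by
        rw [Nat.testBit_two_pow_add_eq, Nat.testBit_lt_two_pow hi]
        rfl
      have hlow : pvG start end_ VW n (2 ^ n + i) = pvG start end_ VW n i := by
        unfold pvG
        apply PySem.List.foldl_congr_mem
        intro acc k hk
        rw [List.mem_range] at hk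
        rw [Nat.testBit_two_pow_add_gt hk]
      rw [hbit, hlow]
      simp

theorem pvScanEq (l : List (Int × Int)) (pre : Option (Int × Int))
    (da : List (Int × Int)) (db : PySem.Set (Int × Int))
    (hm : ∀ x, x ∈ da ↔ x ∈ db) :
    (l.foldl pvStepA (pre, da)).1 = (l.foldl pvStepB (pre, db)).1 ∧
      ∀ x, x ∈ (l.foldl pvStepA (pre, da)).2 ↔ x ∈ (l.foldl pvStepB (pre, db)).2 := by
  induction l generalizing pre da db with
  | nil => exact ⟨rfl, hm⟩
  | cons p l ih =>
    rw [List.foldl_cons, List.foldl_cons]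
    cases pre with
    | none => exact ih (some p) da db hm
    | some q =>
      obtain ⟨pv, pw⟩ := q
      have hA : pvStepA (some (pv, pw), da) p =
          if p.1 = pv ∧ p.2 < pw then (some (pv, pw), da ++ [(pv, pw)])
          else if p.1 ≠ pv ∧ pw ≤ p.2 then (some (pv, pw), da ++ [p])
          else (some p, da) := rfl
      have hB : pvStepB (some (pv, pw), db) p =
          if p.1 = pv ∧ p.2 < pw then (some (pv, pw), PySem.Set.add db (pv, pw))
          else if p.1 ≠ pv ∧ pw ≤ p.2 then (some (pv, pw), PySem.Set.add db p)
          else (some p, db) := rfl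
      rw [hA, hB]
      split_ifs with h1 h2
      · apply ih
        intro x
        simp only [List.mem_append, List.mem_singleton, PySem.Set.mem_add, hm]
      · apply ih
        intro x
        simp only [List.mem_append, List.mem_singleton, PySem.Set.mem_add, hm]
      · exact ih _ _ _ hm

theorem pvTailEq (pat : List (Int × Int)) :
    ((pat.filter (fun p => !((pat.reverse.foldl pvStepA (none, [])).2.contains p))).map
        (fun p => [p.2, p.1])) =
      ((pat.filter (fun p =>
          !(PySem.Set.contains (pat.reverse.foldl pvStepB (none, PySem.Set.empty)).2 p))).map
        (fun p => [p.2, p.1])) := by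
  obtain ⟨-, h2⟩ := pvScanEq pat.reverse none [] PySem.Set.empty (fun x => Iff.rfl)
  congr 1
  apply List.filter_congr
  intro x _
  have hx := h2 x
  simp only [PySem.Set.contains_eq_listContains]
  rw [Bool.not_inj_iff, Bool.eq_iff_iff]
  simpa [List.contains_iff_mem] using hx

-- ===== VERDICT (by name: the statement is the Claim_ definition above) =====
theorem enum_full_spec : Claim_equal_enum_full := by
  intro start end_ ele W VW _ hpre
  obtain ⟨hele, hrow⟩ := hpre
  unfold Spec_enum_full enum_full enum_full_alt
  rw [if_neg (by omega)]
  -- A's pattern fold: eliminate the option via pvASubset_eq, then turn it into filter ∘ map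
  rw [PySem.List.foldl_congr_mem (List.range (2 ^ ele.toNat)) _
      (fun pat (i : Nat) =>
        if (pvG start end_ VW ele.toNat i).2 ≤ W then pat ++ [pvG start end_ VW ele.toNat i] else pat) []
      (by
        intro pat i hi
        rw [List.mem_range] at hi
        rw [pvASubset_eq start end_ VW ele hele hrow i hi])]
  rw [PySem.List.foldl_append_ite (fun i => (pvG start end_ VW ele.toNat i).2 ≤ W)
    (fun i => pvG start end_ VW ele.toNat i), List.nil_append]
  -- B's doubling DP produces the same list of subset sums
  rw [pvDouble_eq start end_ VW ele.toNat]
  simp only [List.filter_map, Function.comp]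
  exact pvTailEq _
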